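-- pv_equiv track=rewrite | github.com/Azmal1/Python-oops-assignment | python/assignment 1/19.small and largest word in a string.py | find_smallest_and_largest_word
-- ===== SOURCE A (Python) =====
-- def find_smallest_and_largest_word(input_string):
--     words = input_string.split()
--
--     # Initialize variables to store the smallest and largest words
--     smallest_word = None
--     largest_word = None
--
--     for word in words:
--         # Remove any punctuation or special characters from the word
--         cleaned_word = ''.join(char for char in word if char.isalnum())
--
--         # Update smallest_word and largest_word
--         if smallest_word is None or len(cleaned_word) < len(smallest_word):
--             smallest_word = cleaned_word
--
--         if largest_word is None or len(cleaned_word) > len(largest_word):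
--             largest_word = cleaned_word
--
--     return smallest_word, largest_word
-- ===== SOURCE B (Python) =====
-- def find_smallest_and_largest_word(input_string):
--     # Group words by cleaned length: first word of each length, keyed by length.
--     by_len = {}
--     for word in input_string.split():
--         cleaned = ''.join(ch for ch in word if ch.isalnum())
--         by_len.setdefault(len(cleaned), cleaned)
--     if not by_len:
--         return None, None
--     return by_len[min(by_len)], by_len[max(by_len)]
-- ===== Notes on version B (the rewrite author's own statement) =====
-- stated objective: alternative
-- what changed: Replaces A's fused two-accumulator comparison loop with a different data structure: a dict mapping each cleaned length to the first word of that length, answered at the end by lookups at min(keys) and max(keys).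
import Mathlib
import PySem

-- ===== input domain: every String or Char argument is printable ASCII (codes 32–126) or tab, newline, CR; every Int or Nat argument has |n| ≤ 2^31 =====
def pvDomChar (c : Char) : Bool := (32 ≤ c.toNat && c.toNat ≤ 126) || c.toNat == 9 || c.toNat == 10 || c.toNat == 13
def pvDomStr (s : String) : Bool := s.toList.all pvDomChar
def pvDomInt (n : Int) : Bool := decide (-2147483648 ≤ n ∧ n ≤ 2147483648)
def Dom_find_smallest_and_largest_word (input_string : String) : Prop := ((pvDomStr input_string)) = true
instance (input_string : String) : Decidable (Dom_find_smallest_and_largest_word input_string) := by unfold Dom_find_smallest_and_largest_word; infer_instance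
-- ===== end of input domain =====

-- B replaces A's fused comparison-tracking loop by a different data structure: a dict
-- grouping the first cleaned word of each length by its length, answered by min/max over the keys.


-- ===== PORT A =====
-- ''.join(char for char in word if char.isalnum())  (used verbatim by both Pythons)
def pvClean (word : String) : String :=
  String.ofList (word.toList.filter PySem.Chars.isalnum)

def find_smallest_and_largest_word (input_string : String) : Option String × Option String :=
  let words := PySem.Str.split₀ input_string
  words.foldl
    (fun (acc : Option String × Option String) word =>
      let cleaned_word := pvClean word
      let smallest_word :=
        match acc.1 with
        | none => some cleaned_word
        | some s => if PySem.Str.len cleaned_word < PySem.Str.len s then some cleaned_word else some s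
      let largest_word :=
        match acc.2 with
        | none => some cleaned_word
        | some l => if PySem.Str.len l < PySem.Str.len cleaned_word then some cleaned_word else some l
      (smallest_word, largest_word))
    (none, none)

-- ===== PORT B =====
def find_smallest_and_largest_word_alt (input_string : String) : Option String × Option String :=
  let by_len :=
    (PySem.Str.split₀ input_string).foldl
      (fun (d : PySem.Dict Int String) word =>
        let cleaned := pvClean word
        d.setdefault (PySem.Str.len cleaned) cleaned)
      PySem.Dict.empty
  match PySem.List.min? by_len.keys (fun k => k), PySem.List.max? by_len.keys (fun k => k) with
  | some kmin, some kmax => (by_len.get? kmin, by_len.get? kmax)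
  | _, _ => (none, none)

-- ===== PRECONDITION & SPEC =====
def Spec_find_smallest_and_largest_word (input_string : String) (out : Option String × Option String) : Prop := out = find_smallest_and_largest_word_alt input_string
instance (input_string : String) (out : Option String × Option String) : Decidable (Spec_find_smallest_and_largest_word input_string out) := by unfold Spec_find_smallest_and_largest_word; infer_instance

-- ===== CLAIM (what is proved, stated in full; the proofs are below) =====
def Claim_equal_find_smallest_and_largest_word : Prop := ∀ (input_string : String), Dom_find_smallest_and_largest_word input_string → Spec_find_smallest_and_largest_word input_string (find_smallest_and_largest_word input_string)

-- ===== LEMMAS AND PROOFS =====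
-- Lookup at the minimal / maximal key (B's final step, as a function of the dict).
def pvLookMin (d : PySem.Dict Int String) : Option String :=
  match PySem.List.min? d.keys (fun k => k) with
  | none => none
  | some k => d.get? k

def pvLookMax (d : PySem.Dict Int String) : Option String :=
  match PySem.List.max? d.keys (fun k => k) with
  | none => none
  | some k => d.get? k

-- one fold step of min?/max? over an appended key
theorem pv_min?_append (ks : List Int) (k : Int) :
    PySem.List.min? (ks ++ [k]) (fun x => x)
    = (match PySem.List.min? ks (fun x => x) with
       | none => some k
       | some m => if k < m then some k else some m) := by
  unfold PySem.List.min?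
  rw [List.foldl_append]
  generalize List.foldl _ none ks = acc
  cases acc <;> simp

theorem pv_max?_append (ks : List Int) (k : Int) :
    PySem.List.max? (ks ++ [k]) (fun x => x)
    = (match PySem.List.max? ks (fun x => x) with
       | none => some k
       | some m => if m < k then some k else some m) := by
  unfold PySem.List.max?
  rw [List.foldl_append]
  generalize List.foldl _ none ks = acc
  cases acc <;> simp

-- A's one-word update of the smallest accumulator = B's setdefault, seen through pvLookMin
theorem pv_min_step (d : PySem.Dict Int String)
    (hinv : ∀ p ∈ d.items, PySem.Str.len p.2 = p.1) (c : String) :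
    (match pvLookMin d with
     | none => some c
     | some s => if PySem.Str.len c < PySem.Str.len s then some c else some s)
    = pvLookMin (d.setdefault (PySem.Str.len c) c) := by
  by_cases hc : d.contains (PySem.Str.len c) = true
  · rw [PySem.Dict.setdefault_of_contains d _ hc]
    have hk : PySem.Str.len c ∈ d.keys := (PySem.Dict.contains_iff_mem_keys d _).mp hc
    have hne : d.keys ≠ [] := by intro h; rw [h] at hk; exact absurd hk (List.not_mem_nil)
    obtain ⟨kmin, hkm⟩ : ∃ kmin, PySem.List.min? d.keys (fun x => x) = some kmin := by
      cases h : PySem.List.min? d.keys (fun x => x) with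
      | none => exact absurd ((PySem.List.min?_eq_none_iff _ _).mp h) hne
      | some m => exact ⟨m, rfl⟩
    have hkmem : kmin ∈ d.keys := PySem.List.min?_mem hkm
    obtain ⟨m, hm⟩ : ∃ m, d.get? kmin = some m := by
      cases h : d.get? kmin with
      | none => exact absurd hkmem ((PySem.Dict.get?_eq_none_iff_not_mem_keys d _).mp h)
      | some m => exact ⟨m, rfl⟩
    have hlen : PySem.Str.len m = kmin := hinv _ (PySem.Dict.mem_items_of_get?_eq_some _ hm)
    have hle : kmin ≤ PySem.Str.len c := PySem.List.min?_isMin hkm _ hk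
    simp only [pvLookMin, hkm, hm, hlen]
    rw [if_neg (by omega)]
  · have hcf : d.contains (PySem.Str.len c) = false := by
      revert hc; cases d.contains (PySem.Str.len c) <;> simp
    rw [PySem.Dict.setdefault_of_not_contains d _ hcf]
    have hkeys : (d.insert (PySem.Str.len c) c).keys = d.keys ++ [PySem.Str.len c] :=
      PySem.Dict.keys_insert_of_not_contains d _ hcf
    cases h : PySem.List.min? d.keys (fun x => x) with
    | none =>
      have hnil : d.keys = [] := (PySem.List.min?_eq_none_iff _ _).mp h
      simp only [pvLookMin, hkeys, pv_min?_append, hnil]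
      simp [PySem.List.min?, PySem.Dict.get?_insert_self]
    | some kmin =>
      have hkmem : kmin ∈ d.keys := PySem.List.min?_mem h
      obtain ⟨m, hm⟩ : ∃ m, d.get? kmin = some m := by
        cases h' : d.get? kmin with
        | none => exact absurd hkmem ((PySem.Dict.get?_eq_none_iff_not_mem_keys d _).mp h')
        | some m => exact ⟨m, rfl⟩
      have hlen : PySem.Str.len m = kmin := hinv _ (PySem.Dict.mem_items_of_get?_eq_some _ hm)
      have hnek : kmin ≠ PySem.Str.len c := by
        intro he
        exact hc ((PySem.Dict.contains_iff_mem_keys d _).mpr (he ▸ hkmem))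
      simp only [pvLookMin, hkeys, pv_min?_append, h, hm, hlen]
      by_cases hlt : PySem.Str.len c < kmin
      · rw [if_pos hlt, if_pos hlt]
        simp [PySem.Dict.get?_insert_self]
      · rw [if_neg hlt, if_neg hlt]
        show some m = (d.insert (PySem.Str.len c) c).get? kmin
        rw [PySem.Dict.get?_insert_of_ne _ _ hnek, hm]

theorem pv_max_step (d : PySem.Dict Int String)
    (hinv : ∀ p ∈ d.items, PySem.Str.len p.2 = p.1) (c : String) :
    (match pvLookMax d with
     | none => some c
     | some l => if PySem.Str.len l < PySem.Str.len c then some c else some l)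
    = pvLookMax (d.setdefault (PySem.Str.len c) c) := by
  by_cases hc : d.contains (PySem.Str.len c) = true
  · rw [PySem.Dict.setdefault_of_contains d _ hc]
    have hk : PySem.Str.len c ∈ d.keys := (PySem.Dict.contains_iff_mem_keys d _).mp hc
    have hne : d.keys ≠ [] := by intro h; rw [h] at hk; exact absurd hk (List.not_mem_nil)
    obtain ⟨kmax, hkm⟩ : ∃ kmax, PySem.List.max? d.keys (fun x => x) = some kmax := by
      cases h : PySem.List.max? d.keys (fun x => x) with
      | none => exact absurd ((PySem.List.max?_eq_none_iff _ _).mp h) hne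
      | some m => exact ⟨m, rfl⟩
    have hkmem : kmax ∈ d.keys := PySem.List.max?_mem hkm
    obtain ⟨m, hm⟩ : ∃ m, d.get? kmax = some m := by
      cases h : d.get? kmax with
      | none => exact absurd hkmem ((PySem.Dict.get?_eq_none_iff_not_mem_keys d _).mp h)
      | some m => exact ⟨m, rfl⟩
    have hlen : PySem.Str.len m = kmax := hinv _ (PySem.Dict.mem_items_of_get?_eq_some _ hm)
    have hle : PySem.Str.len c ≤ kmax := PySem.List.max?_isMax hkm _ hk
    simp only [pvLookMax, hkm, hm, hlen]
    rw [if_neg (by omega)]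
  · have hcf : d.contains (PySem.Str.len c) = false := by
      revert hc; cases d.contains (PySem.Str.len c) <;> simp
    rw [PySem.Dict.setdefault_of_not_contains d _ hcf]
    have hkeys : (d.insert (PySem.Str.len c) c).keys = d.keys ++ [PySem.Str.len c] :=
      PySem.Dict.keys_insert_of_not_contains d _ hcf
    cases h : PySem.List.max? d.keys (fun x => x) with
    | none =>
      have hnil : d.keys = [] := (PySem.List.max?_eq_none_iff _ _).mp h
      simp only [pvLookMax, hkeys, pv_max?_append, hnil]
      simp [PySem.List.max?, PySem.Dict.get?_insert_self]
    | some kmax =>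
      have hkmem : kmax ∈ d.keys := PySem.List.max?_mem h
      obtain ⟨m, hm⟩ : ∃ m, d.get? kmax = some m := by
        cases h' : d.get? kmax with
        | none => exact absurd hkmem ((PySem.Dict.get?_eq_none_iff_not_mem_keys d _).mp h')
        | some m => exact ⟨m, rfl⟩
      have hlen : PySem.Str.len m = kmax := hinv _ (PySem.Dict.mem_items_of_get?_eq_some _ hm)
      have hnek : kmax ≠ PySem.Str.len c := by
        intro he
        exact hc ((PySem.Dict.contains_iff_mem_keys d _).mpr (he ▸ hkmem))
      simp only [pvLookMax, hkeys, pv_max?_append, h, hm, hlen]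
      by_cases hlt : kmax < PySem.Str.len c
      · rw [if_pos hlt, if_pos hlt]
        simp [PySem.Dict.get?_insert_self]
      · rw [if_neg hlt, if_neg hlt]
        show some m = (d.insert (PySem.Str.len c) c).get? kmax
        rw [PySem.Dict.get?_insert_of_ne _ _ hnek, hm]

-- setdefault keyed by the value's length preserves the length invariant
theorem pv_inv_step (d : PySem.Dict Int String)
    (hinv : ∀ p ∈ d.items, PySem.Str.len p.2 = p.1) (c : String) :
    ∀ p ∈ (d.setdefault (PySem.Str.len c) c).items, PySem.Str.len p.2 = p.1 := by
  unfold PySem.Dict.setdefault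
  split_ifs with hc
  · exact hinv
  · intro p hp
    rcases List.mem_append.mp hp with h | h
    · exact hinv p h
    · simp at h; subst h; rfl

-- A's fused fold over the words = lookup-min/lookup-max of B's dict fold
theorem pv_main (ws : List String) (d : PySem.Dict Int String)
    (hinv : ∀ p ∈ d.items, PySem.Str.len p.2 = p.1) :
    ws.foldl
      (fun (acc : Option String × Option String) word =>
        let cleaned_word := pvClean word
        let smallest_word :=
          match acc.1 with
          | none => some cleaned_word
          | some s => if PySem.Str.len cleaned_word < PySem.Str.len s then some cleaned_word else some s
        let largest_word :=
          match acc.2 with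
          | none => some cleaned_word
          | some l => if PySem.Str.len l < PySem.Str.len cleaned_word then some cleaned_word else some l
        (smallest_word, largest_word))
      (pvLookMin d, pvLookMax d)
    = (pvLookMin
        (ws.foldl (fun (d : PySem.Dict Int String) word =>
          let cleaned := pvClean word
          d.setdefault (PySem.Str.len cleaned) cleaned) d),
       pvLookMax
        (ws.foldl (fun (d : PySem.Dict Int String) word =>
          let cleaned := pvClean word
          d.setdefault (PySem.Str.len cleaned) cleaned) d)) := by
  induction ws generalizing d with
  | nil => rfl
  | cons w t ih =>
    simp only [List.foldl_cons]
    rw [show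
        (let cleaned_word := pvClean w
         let smallest_word :=
           match pvLookMin d with
           | none => some cleaned_word
           | some s => if PySem.Str.len cleaned_word < PySem.Str.len s then some cleaned_word else some s
         let largest_word :=
           match pvLookMax d with
           | none => some cleaned_word
           | some l => if PySem.Str.len l < PySem.Str.len cleaned_word then some cleaned_word else some l
         (smallest_word, largest_word))
        = (pvLookMin (d.setdefault (PySem.Str.len (pvClean w)) (pvClean w)),
           pvLookMax (d.setdefault (PySem.Str.len (pvClean w)) (pvClean w)))
      from by
        simp only
        rw [pv_min_step d hinv (pvClean w), pv_max_step d hinv (pvClean w)]]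
    exact ih _ (pv_inv_step d hinv (pvClean w))

theorem find_smallest_and_largest_word_equal (input_string : String) :
    find_smallest_and_largest_word input_string = find_smallest_and_largest_word_alt input_string := by
  unfold find_smallest_and_largest_word find_smallest_and_largest_word_alt
  simp only
  rw [show ((none, none) : Option String × Option String)
        = (pvLookMin PySem.Dict.empty, pvLookMax PySem.Dict.empty) from rfl]
  rw [pv_main _ PySem.Dict.empty (by simp [PySem.Dict.empty])]
  set d := (PySem.Str.split₀ input_string).foldl
    (fun (d : PySem.Dict Int String) word =>
      let cleaned := pvClean word
      d.setdefault (PySem.Str.len cleaned) cleaned) PySem.Dict.empty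
  cases hmin : PySem.List.min? d.keys (fun k => k) with
  | none =>
    have hnil : d.keys = [] := (PySem.List.min?_eq_none_iff _ _).mp hmin
    have hmax : PySem.List.max? d.keys (fun k => k) = none :=
      (PySem.List.max?_eq_none_iff _ _).mpr hnil
    simp [pvLookMin, pvLookMax, hnil, PySem.List.min?, PySem.List.max?]
  | some kmin =>
    cases hmax : PySem.List.max? d.keys (fun k => k) with
    | none =>
      have hnil : d.keys = [] := (PySem.List.max?_eq_none_iff _ _).mp hmax
      rw [(PySem.List.min?_eq_none_iff _ _).mpr hnil] at hmin
      exact absurd hmin (by simp)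
    | some kmax => simp [pvLookMin, pvLookMax, hmin, hmax]

-- ===== VERDICT (by name: the statement is the Claim_ definition above) =====
theorem find_smallest_and_largest_word_spec : Claim_equal_find_smallest_and_largest_word := by
  intro s _
  exact find_smallest_and_largest_word_equal s
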